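-- pv_equiv track=rewrite | github.com/amol179/DSA_Notes_Dump | Code_Force/1000/C. Ski Resort/C. Ski Resort.py | count_vacation_ways
-- ===== SOURCE A (Python) =====
-- def count_vacation_ways(t, test_cases):
--     results = []
--
--     for test in test_cases:
--         n, k, q = test[0]
--         a = test[1]
--
--         count = 0
--         valid_length = 0
--
--         for temp in a + [q + 1]:  # Append a sentinel value greater than q
--             if temp <= q:
--                 valid_length += 1
--             else:
--                 if valid_length >= k:
--                     # Count subarrays of length >= k
--                     count += (valid_length - k + 1) * (valid_length - k + 2) // 2
--                 valid_length = 0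
--
--         results.append(count)
--
--     return results
-- ===== SOURCE B (Python) =====
-- def count_vacation_ways(t, test_cases):
--     results = []
--     for test in test_cases:
--         n, k, q = test[0]
--         a = test[1]
--         count = 0
--         run = 0
--         for temp in a:
--             if temp <= q:
--                 run += 1
--                 if run >= k:
--                     count += run - k + 1
--             else:
--                 run = 0
--         results.append(count)
--     return results
-- ===== Notes on version B (the rewrite author's own statement) =====
-- stated objective: simpler
-- what changed: B drops A's appended sentinel and per-run triangular formula (L-k+1)(L-k+2)//2 and instead adds run-k+1 incrementally on every day that extends a valid run, counting the subarrays ending at each day.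
-- outside the precondition, e.g. on count_vacation_ways(1, [([1, 0, 5], [1])]): A returns [3], B returns [2]
import Mathlib
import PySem

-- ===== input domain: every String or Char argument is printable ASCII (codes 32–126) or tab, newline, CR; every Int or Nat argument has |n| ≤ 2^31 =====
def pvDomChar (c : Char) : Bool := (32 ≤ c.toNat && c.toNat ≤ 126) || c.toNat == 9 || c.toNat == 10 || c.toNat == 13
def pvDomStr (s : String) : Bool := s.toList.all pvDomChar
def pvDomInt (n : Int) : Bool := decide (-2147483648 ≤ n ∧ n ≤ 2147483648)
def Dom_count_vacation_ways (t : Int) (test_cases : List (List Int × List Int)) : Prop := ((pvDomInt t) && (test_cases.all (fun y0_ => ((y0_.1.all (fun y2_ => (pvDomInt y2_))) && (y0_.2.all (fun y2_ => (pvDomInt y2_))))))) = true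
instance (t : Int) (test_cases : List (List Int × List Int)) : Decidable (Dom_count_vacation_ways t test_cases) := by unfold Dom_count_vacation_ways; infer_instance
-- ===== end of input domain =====

-- B replaces A's sentinel-plus-triangular-formula run counting by an incremental per-day count (simpler).


-- ===== PORT A =====
-- inner loop body of A: state = (count, valid_length)
def aStep (k q : Int) (s : Int × Int) (temp : Int) : Int × Int :=
  if temp ≤ q then (s.1, s.2 + 1)
  else
    (if s.2 ≥ k then s.1 + PySem.Int.floordiv ((s.2 - k + 1) * (s.2 - k + 2)) 2 else s.1, 0)

def count_vacation_ways (t : Int) (test_cases : List (List Int × List Int)) : List Int :=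
  test_cases.foldl (fun results test =>
    match test.1 with
    | [n, k, q] =>
      let a := test.2
      let s := (a ++ [q + 1]).foldl (aStep k q) (0, 0)   -- sentinel value greater than q
      results ++ [s.1]
    | _ => results ++ [0]   -- unreachable under Pre_: Python raises on unpacking here
  ) []

-- ===== PORT B =====
-- inner loop body of B: state = (count, run)
def bStep (k q : Int) (s : Int × Int) (temp : Int) : Int × Int :=
  if temp ≤ q then
    (if s.2 + 1 ≥ k then s.1 + (s.2 + 1 - k + 1) else s.1, s.2 + 1)
  else (s.1, 0)

-- per-test count of B (tuple unpacking of (params, temps); 0 where Python would raise, unreachable under Pre_)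
def bCase (test : List Int × List Int) : Int :=
  match test with
  | ([_n, k, q], a) => (a.foldl (bStep k q) (0, 0)).1
  | ([], _) => 0
  | ([_], _) => 0
  | ([_, _], _) => 0
  | (_ :: _ :: _ :: _ :: _, _) => 0

def count_vacation_ways_alt (t : Int) (test_cases : List (List Int × List Int)) : List Int :=
  test_cases.foldl (fun results test => results ++ [bCase test]) []

-- ===== PRECONDITION & SPEC =====
-- Pre_ requires each test's parameter triple to have exactly three entries (otherwise A's tuple
-- unpacking raises ValueError), and k ≥ 1: for k ≤ 0 the notion "subarrays of length ≥ k" is an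
-- unspecified corner (it admits length-0 subarrays), where A's sentinel flush also counts each
-- empty run and B counts only nonempty subarrays — both defensible, so those inputs are excluded.
def Pre_count_vacation_ways (t : Int) (test_cases : List (List Int × List Int)) : Prop :=
  ∀ test ∈ test_cases, test.1.length = 3 ∧ 1 ≤ test.1.getD 1 0
instance (t : Int) (test_cases : List (List Int × List Int)) : Decidable (Pre_count_vacation_ways t test_cases) := by unfold Pre_count_vacation_ways; infer_instance

def pvWitness_count_vacation_ways : Int × (List (List Int × List Int)) :=
  (1, [([4, 2, 5], [1, 6, 2, 3]), ([3, 1, 0], [0, 0, 1])])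

def Spec_count_vacation_ways (t : Int) (test_cases : List (List Int × List Int)) (out : List Int) : Prop := out = count_vacation_ways_alt t test_cases
instance (t : Int) (test_cases : List (List Int × List Int)) (out : List Int) : Decidable (Spec_count_vacation_ways t test_cases out) := by unfold Spec_count_vacation_ways; infer_instance

-- ===== CLAIM (what is proved, stated in full; the proofs are below) =====
def Claim_equal_count_vacation_ways : Prop := ∀ (t : Int) (test_cases : List (List Int × List Int)), Dom_count_vacation_ways t test_cases → Pre_count_vacation_ways t test_cases → Spec_count_vacation_ways t test_cases (count_vacation_ways t test_cases)

-- ===== LEMMAS AND PROOFS =====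

-- the pending contribution of a run of length v that A has not yet flushed
def pend (k v : Int) : Int :=
  if v ≥ k then PySem.Int.floordiv ((v - k + 1) * (v - k + 2)) 2 else 0

-- T(m+1) = T(m) + (m+1), phrased on pend
lemma pend_succ (k v : Int) (hk : 1 ≤ k) (hv : 0 ≤ v) :
    pend k (v + 1) = pend k v + (if v + 1 ≥ k then v + 1 - k + 1 else 0) := by
  unfold pend
  by_cases h1 : v + 1 ≥ k
  · by_cases h2 : v ≥ k
    · simp only [h1, h2, if_true]
      set m : Int := v - k + 1 with hm
      have hmpos : 1 ≤ m := by omega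
      obtain ⟨c, hc⟩ : ∃ c, m * (m + 1) = 2 * c := by
        rcases Int.even_mul_succ_self m with ⟨c, hc⟩
        exact ⟨c, by omega⟩
      have h3 : (v + 1 - k + 1) * (v + 1 - k + 2) = 2 * (c + (m + 1)) := by
        have : (v + 1 - k + 1) * (v + 1 - k + 2) = m * (m + 1) + 2 * (m + 1) := by ring
        omega
      have h4 : (v - k + 1) * (v - k + 2) = 2 * c := by
        have : (v - k + 1) * (v - k + 2) = m * (m + 1) := by ring
        omega
      rw [h3, h4]
      rw [PySem.Int.floordiv_eq_ediv_of_pos (by norm_num),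
          PySem.Int.floordiv_eq_ediv_of_pos (by norm_num)]
      omega
    · -- v + 1 = k : new run just reached length k
      have hvk : v + 1 = k := by omega
      simp only [h1, h2, if_true, if_false]
      have h3 : (v + 1 - k + 1) * (v + 1 - k + 2) = 2 := by
        have e1 : v + 1 - k + 1 = 1 := by omega
        have e2 : v + 1 - k + 2 = 2 := by omega
        rw [e1, e2]; norm_num
      rw [h3, PySem.Int.floordiv_eq_ediv_of_pos (by norm_num)]
      omega
  · have h2 : ¬ v ≥ k := by omega
    simp [h1, h2]

-- loop invariant: B's running count equals A's count plus the pending contribution of the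
-- current run, and the run lengths coincide (and stay nonnegative)
lemma fold_inv (k q : Int) (hk : 1 ≤ k) :
    ∀ (a : List Int) (c v : Int), 0 ≤ v →
      (a.foldl (bStep k q) (c + pend k v, v)).2 = (a.foldl (aStep k q) (c, v)).2 ∧
      0 ≤ (a.foldl (aStep k q) (c, v)).2 ∧
      (a.foldl (bStep k q) (c + pend k v, v)).1
        = (a.foldl (aStep k q) (c, v)).1 + pend k (a.foldl (aStep k q) (c, v)).2 := by
  intro a
  induction a with
  | nil => intro c v hv; exact ⟨rfl, hv, rfl⟩
  | cons temp rest ih =>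
    intro c v hv
    simp only [List.foldl_cons]
    by_cases h : temp ≤ q
    · have hA : aStep k q (c, v) temp = (c, v + 1) := by simp [aStep, h]
      have hB : bStep k q (c + pend k v, v) temp
          = (c + pend k v + (if v + 1 ≥ k then v + 1 - k + 1 else 0), v + 1) := by
        simp only [bStep, if_pos h]
        by_cases h2 : v + 1 ≥ k <;> simp [h2]
      have heq : c + pend k v + (if v + 1 ≥ k then v + 1 - k + 1 else 0) = c + pend k (v + 1) := by
        rw [pend_succ k v hk hv]; ring
      rw [hA, hB, heq]
      exact ih c (v + 1) (by omega)
    · have hA : aStep k q (c, v) temp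
          = (c + pend k v, 0) := by
        unfold aStep pend
        by_cases h2 : v ≥ k <;> simp [h, h2]
      have hB : bStep k q (c + pend k v, v) temp = (c + pend k v, 0) := by
        simp [bStep, h]
      rw [hA, hB]
      have hp0 : pend k 0 = 0 := by unfold pend; simp; omega
      have := ih (c + pend k v) 0 le_rfl
      rw [hp0, add_zero] at this
      exact this

-- per-test equality: A's sentinel flush of the final run equals B's plain fold
lemma per_test (k q : Int) (a : List Int) (hk : 1 ≤ k) :
    ((a ++ [q + 1]).foldl (aStep k q) (0, 0)).1 = (a.foldl (bStep k q) (0, 0)).1 := by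
  rw [List.foldl_append]
  obtain ⟨h2, _, h1⟩ := fold_inv k q hk a 0 0 le_rfl
  have hp0 : pend k 0 = 0 := by unfold pend; simp; omega
  rw [hp0, add_zero] at h1 h2
  set s := a.foldl (aStep k q) (0, 0)
  have hflush : (List.foldl (aStep k q) s [q + 1]).1 = s.1 + pend k s.2 := by
    simp only [List.foldl_cons, List.foldl_nil]
    unfold aStep pend
    by_cases h2 : s.2 ≥ k <;> simp [h2]
  rw [hflush, ← h1]

lemma fold_outer (t : Int) (test_cases : List (List Int × List Int))
    (hpre : Pre_count_vacation_ways t test_cases) :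
    ∀ acc : List Int,
      test_cases.foldl (fun results test =>
        match test.1 with
        | [n, k, q] =>
          let a := test.2
          let s := (a ++ [q + 1]).foldl (aStep k q) (0, 0)
          results ++ [s.1]
        | _ => results ++ [0]) acc
      = test_cases.foldl (fun results test => results ++ [bCase test]) acc := by
  induction test_cases with
  | nil => intro acc; rfl
  | cons test rest ih =>
    intro acc
    obtain ⟨ps, a⟩ := test
    have htest := hpre (ps, a) (by simp)
    have hrest : Pre_count_vacation_ways t rest := by
      intro x hx; exact hpre x (by simp [hx])
    obtain ⟨hl, hk⟩ := htest
    match hmt : ps with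
    | [n, k, q] =>
      have hk1 : 1 ≤ k := by simpa using hk
      simp only [List.foldl_cons, bCase]
      rw [per_test k q a hk1]
      exact ih hrest _
    | [] => simp [hmt] at hl
    | [_] => simp [hmt] at hl
    | [_, _] => simp [hmt] at hl
    | _ :: _ :: _ :: _ :: _ => simp [hmt] at hl

-- ===== VERDICT (by name: the statement is the Claim_ definition above) =====
theorem count_vacation_ways_spec : Claim_equal_count_vacation_ways := by
  intro t test_cases _ hpre
  unfold Spec_count_vacation_ways count_vacation_ways count_vacation_ways_alt
  exact fold_outer t test_cases hpre []
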